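-- pv_equiv track=rewrite | github.com/olegtaratuhin/itmo-dl | models/scripts/converter_2.py | get_vicin_vals
-- ===== SOURCE A (Python) =====
-- def get_vicin_vals(mat, x, y, xyrange):
--     width = len(mat[0])
--     height = len(mat)
--     vicinVals = []
--     for xx in range(x - xyrange, x + xyrange + 1):
--         for yy in range(y - xyrange, y + xyrange + 1):
--             if 0 <= xx < width and 0 <= yy < height:
--                 vicinVals.append(mat[yy][xx])
--     return vicinVals
-- ===== SOURCE B (Python) =====
-- def get_vicin_vals(mat, x, y, xyrange):
--     width = len(mat[0])
--     height = len(mat)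
--     x0, x1 = max(0, x - xyrange), min(width, max(0, x + xyrange + 1))
--     y0, y1 = max(0, y - xyrange), min(height, max(0, y + xyrange + 1))
--     rows = [row[x0:x1] for row in mat[y0:y1]]
--     return [v for col in zip(*rows) for v in col]
-- ===== Notes on version B (the rewrite author's own statement) =====
-- stated objective: alternative
-- what changed: B traverses row-major: it slices the clamped window out of each row of the clamped row band, then transposes the collected slices with zip(*rows) to recover A's column-major output order, instead of A's per-cell column-major scan with a bound check at every cell
-- outside the precondition, e.g. on get_vicin_vals([], 0, 0, 1): A raises IndexError, B raises IndexError; on get_vicin_vals([[1, 2], [3]], 1, 0, 1): A raises IndexError, B returns [1, 3]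
import Mathlib
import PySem

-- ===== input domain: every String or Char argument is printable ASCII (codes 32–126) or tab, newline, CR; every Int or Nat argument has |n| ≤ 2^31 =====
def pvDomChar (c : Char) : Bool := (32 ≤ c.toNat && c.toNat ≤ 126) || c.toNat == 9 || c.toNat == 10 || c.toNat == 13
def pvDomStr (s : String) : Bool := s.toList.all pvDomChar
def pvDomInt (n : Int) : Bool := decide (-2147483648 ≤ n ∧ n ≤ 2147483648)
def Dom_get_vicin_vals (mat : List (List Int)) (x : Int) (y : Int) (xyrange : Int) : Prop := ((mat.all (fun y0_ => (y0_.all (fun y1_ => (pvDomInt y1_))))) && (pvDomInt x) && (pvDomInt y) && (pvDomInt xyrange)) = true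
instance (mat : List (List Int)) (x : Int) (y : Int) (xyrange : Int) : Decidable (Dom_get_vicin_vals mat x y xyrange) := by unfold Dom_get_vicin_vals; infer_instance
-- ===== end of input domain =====

-- B traverses row-major (a window slice of each row of the clamped row band) and recovers
-- A's column-major output order by transposing the slices (zip(*rows)); return values
-- agree with A's per-cell bound-checked column-major scan on all of Pre_.

-- ===== PORT A =====
def get_vicin_vals (mat : List (List Int)) (x : Int) (y : Int) (xyrange : Int) : List Int :=
  let width : Int := ((mat.headD []).length : Int)   -- len(mat[0]); Pre_ excludes mat = []
  let height : Int := (mat.length : Int)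
  (PySem.List.pyRange (x - xyrange) (x + xyrange + 1) 1).foldl (fun acc xx =>
    (PySem.List.pyRange (y - xyrange) (y + xyrange + 1) 1).foldl (fun acc yy =>
      if 0 ≤ xx ∧ xx < width ∧ 0 ≤ yy ∧ yy < height then
        acc ++ [PySem.List.pyGetD (PySem.List.pyGetD mat yy []) xx 0]  -- mat[yy][xx]; ragged-row raise excluded by Pre_
      else acc) acc) []

-- ===== PORT B =====
-- zip(*rows): repeatedly take the heads while every row is nonempty (Python zip truncation)
def pvZipStar (rows : List (List Int)) : List (List Int) :=
  if h : rows ≠ [] ∧ rows.all (fun r => !r.isEmpty) then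
    (rows.map (fun r => r.headD 0)) :: pvZipStar (rows.map (fun r => r.tail))
  else []
  termination_by (rows.headD []).length
  decreasing_by
    rcases rows with _ | ⟨r, rs⟩
    · exact absurd rfl h.1
    · have hr : r ≠ [] := by
        have := h.2; simp [List.all_cons] at this
        simpa [List.isEmpty_iff] using this.1
      have hp : 0 < r.length := List.length_pos_iff.mpr hr
      simp [List.length_tail]
      omega

def get_vicin_vals_alt (mat : List (List Int)) (x : Int) (y : Int) (xyrange : Int) : List Int :=
  let width : Int := ((mat.headD []).length : Int)   -- len(mat[0]); Pre_ excludes mat = []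
  let height : Int := (mat.length : Int)
  let x0 : Int := max 0 (x - xyrange)
  let x1 : Int := min width (max 0 (x + xyrange + 1))
  let y0 : Int := max 0 (y - xyrange)
  let y1 : Int := min height (max 0 (y + xyrange + 1))
  let rows : List (List Int) :=
    (PySem.List.slice mat (some y0) (some y1)).map (fun row => PySem.List.slice row (some x0) (some x1))
  (pvZipStar rows).flatMap (fun col => col)

-- ===== PRECONDITION & SPEC =====
-- Pre_ excludes exactly the inputs where the Python raises IndexError: the empty matrix
-- (mat[0]) and ragged matrices where some visited row is shorter than a visited column index.
def Pre_get_vicin_vals (mat : List (List Int)) (x : Int) (y : Int) (xyrange : Int) : Prop :=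
  mat ≠ [] ∧
  (max 0 (x - xyrange) < min ((mat.headD []).length : Int) (x + xyrange + 1) →
    ∀ i : Fin mat.length, (y - xyrange ≤ (i : Int) ∧ (i : Int) < y + xyrange + 1) →
      min ((mat.headD []).length : Int) (x + xyrange + 1) ≤ ((mat.get i).length : Int))
instance (mat : List (List Int)) (x : Int) (y : Int) (xyrange : Int) : Decidable (Pre_get_vicin_vals mat x y xyrange) := by unfold Pre_get_vicin_vals; infer_instance

def pvWitness_get_vicin_vals : List (List Int) × Int × Int × Int := ([[1, 2], [3, 4]], 0, 1, 1)

def Spec_get_vicin_vals (mat : List (List Int)) (x : Int) (y : Int) (xyrange : Int) (out : List Int) : Prop := out = get_vicin_vals_alt mat x y xyrange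
instance (mat : List (List Int)) (x : Int) (y : Int) (xyrange : Int) (out : List Int) : Decidable (Spec_get_vicin_vals mat x y xyrange out) := by unfold Spec_get_vicin_vals; infer_instance

-- ===== CLAIM (what is proved, stated in full; the proofs are below) =====
def Claim_equal_get_vicin_vals : Prop := ∀ (mat : List (List Int)) (x : Int) (y : Int) (xyrange : Int), Dom_get_vicin_vals mat x y xyrange → Pre_get_vicin_vals mat x y xyrange → Spec_get_vicin_vals mat x y xyrange (get_vicin_vals mat x y xyrange)

-- ===== LEMMAS AND PROOFS =====

-- filtering a step-1 range by membership in [0,c) is the clamped range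
theorem pv_filter_range_clamp (a b c : Int) :
    (PySem.List.pyRange a b 1).filter (fun t => decide (0 ≤ t ∧ t < c)) =
      PySem.List.pyRange (max 0 a) (min c b) 1 := by
  by_cases hab : b ≤ a
  · rw [PySem.List.pyRange_one_eq_nil hab,
        PySem.List.pyRange_one_eq_nil (a := max 0 a) (b := min c b) (by omega)]
    rfl
  · have hlt : a < b := by omega
    rw [PySem.List.pyRange_one_cons hlt, List.filter_cons]
    have ih := pv_filter_range_clamp (a + 1) b c
    rw [ih]
    by_cases h : 0 ≤ a ∧ a < c
    · rw [if_pos (decide_eq_true h),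
          show max 0 (a + 1) = a + 1 by omega, show max 0 a = a by omega,
          PySem.List.pyRange_one_cons (a := a) (b := min c b) (by omega)]
    · rw [if_neg (by simpa using h)]
      rcases not_and_or.mp h with h1 | h2
      · rw [show max 0 (a + 1) = 0 by omega, show max 0 a = 0 by omega]
      · rw [PySem.List.pyRange_one_eq_nil (a := max 0 (a + 1)) (b := min c b) (by omega),
            PySem.List.pyRange_one_eq_nil (a := max 0 a) (b := min c b) (by omega)]
  termination_by (b - a).toNat
  decreasing_by omega

theorem pv_flatMap_if_nil {α β : Type} (l : List α) (p : α → Bool) (f : α → List β) :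
    (l.flatMap (fun t => if p t then f t else [])) = (l.filter p).flatMap f := by
  induction l with
  | nil => rfl
  | cons hd tl ih =>
    simp only [List.flatMap_cons, List.filter_cons]
    by_cases h : p hd <;> simp [h, ih]

theorem pv_flatMap_congr {α β : Type} (l : List α) (f g : α → List β)
    (h : ∀ x ∈ l, f x = g x) : l.flatMap f = l.flatMap g := by
  induction l with
  | nil => rfl
  | cons hd tl ih =>
    simp only [List.flatMap_cons]
    rw [h hd (by simp), ih (fun x hx => h x (by simp [hx]))]

-- pvZipStar of a nonempty list of equal-length rows is the column-index transpose
theorem pv_zipStar_eq (n : ℕ) (rows : List (List Int)) (hne : rows ≠ [])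
    (hlen : ∀ r ∈ rows, r.length = n) :
    pvZipStar rows = (List.range n).map (fun j => rows.map (fun r => r.getD j 0)) := by
  induction n generalizing rows with
  | zero =>
    rcases rows with _ | ⟨r, rs⟩
    · exact absurd rfl hne
    · have hr : r = [] := List.length_eq_zero_iff.mp (hlen r (by simp))
      rw [pvZipStar]
      rw [dif_neg (by simp [hr])]
      simp
  | succ n ih =>
    have hall : rows.all (fun r => !r.isEmpty) = true := by
      simp only [List.all_eq_true]
      intro r hr
      have := hlen r hr
      simp only [Bool.not_eq_eq_eq_not, Bool.not_true, List.isEmpty_eq_false_iff]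
      intro h0; rw [h0] at this; simp at this
    rw [pvZipStar, dif_pos ⟨hne, hall⟩]
    have hne' : rows.map (fun r => r.tail) ≠ [] := by
      simpa using hne
    have hlen' : ∀ r ∈ rows.map (fun r => r.tail), r.length = n := by
      intro r hr
      rcases List.mem_map.mp hr with ⟨s, hs, rfl⟩
      have := hlen s hs
      simp [List.length_tail]; omega
    rw [ih _ hne' hlen']
    rw [List.range_succ_eq_map]
    simp only [List.map_cons, List.map_map]
    congr 1
    · apply List.map_congr_left
      intro r hr
      have hrne : r ≠ [] := by
        intro h0; have := hlen r hr; rw [h0] at this; simp at this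
      rcases r with _ | ⟨a, t⟩
      · exact absurd rfl hrne
      · rfl
    · apply List.map_congr_left
      intro j _
      simp only [Function.comp]
      apply List.map_congr_left
      intro r _
      rcases r with _ | ⟨a, t⟩ <;> rfl

-- a take of a drop, mapped, as a map over range (all indices in bounds)
theorem pv_take_drop_map {α β : Type} (d : α) (f : α → β) (l : List α) (a m : ℕ)
    (h : m = 0 ∨ a + m ≤ l.length) :
    ((l.drop a).take m).map f = (List.range m).map (fun i => f (l.getD (a + i) d)) := by
  apply List.ext_getElem
  · simp; omega
  · intro i h1 h2
    simp only [List.getElem_map, List.getElem_take, List.getElem_drop, List.getElem_range]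
    have him : i < m := by simp at h2; omega
    have hlt : a + i < l.length := by rcases h with h | h <;> omega
    rw [List.getD_eq_getElem l d hlt]

theorem get_vicin_vals_eq_alt (mat : List (List Int)) (x y xyrange : Int)
    (hpre : Pre_get_vicin_vals mat x y xyrange) :
    get_vicin_vals mat x y xyrange = get_vicin_vals_alt mat x y xyrange := by
  obtain ⟨hmat, hrows⟩ := hpre
  unfold get_vicin_vals get_vicin_vals_alt
  simp only [PySem.List.foldl_append_ite, PySem.List.foldl_append_eq_flatMap, List.nil_append]
  set w : Int := ((mat.headD []).length : Int) with hw
  set h : Int := (mat.length : Int) with hh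
  have hw0 : 0 ≤ w := by positivity
  have hh0 : 0 < h := by
    rcases mat with _ | _
    · exact absurd rfl hmat
    · simp [hh]
  -- A to clamped column-major form
  have step1 : ∀ xx : Int,
      ((PySem.List.pyRange (y - xyrange) (y + xyrange + 1) 1).filter
          (fun yy => decide (0 ≤ xx ∧ xx < w ∧ 0 ≤ yy ∧ yy < h))).map
        (fun yy => PySem.List.pyGetD (PySem.List.pyGetD mat yy []) xx 0) =
      (if (decide (0 ≤ xx ∧ xx < w)) then
        (PySem.List.pyRange (max 0 (y - xyrange)) (min h (y + xyrange + 1)) 1).map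
          (fun yy => PySem.List.pyGetD (PySem.List.pyGetD mat yy []) xx 0)
      else []) := by
    intro xx
    by_cases hx : 0 ≤ xx ∧ xx < w
    · rw [if_pos (decide_eq_true hx)]
      have hfilter : (fun yy => decide (0 ≤ xx ∧ xx < w ∧ 0 ≤ yy ∧ yy < h)) =
          (fun yy : Int => decide (0 ≤ yy ∧ yy < h)) := by
        funext yy
        rcases hx with ⟨h1, h2⟩
        simp [h1, h2]
      rw [hfilter, pv_filter_range_clamp]
    · rw [if_neg (by simpa using hx)]
      have hnil : (PySem.List.pyRange (y - xyrange) (y + xyrange + 1) 1).filter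
          (fun yy => decide (0 ≤ xx ∧ xx < w ∧ 0 ≤ yy ∧ yy < h)) = [] := by
        apply List.filter_eq_nil_iff.mpr
        intro t _
        simp only [decide_eq_true_eq]
        exact fun hP => hx ⟨hP.1, hP.2.1⟩
      rw [hnil, List.map_nil]
  simp only [step1]
  rw [pv_flatMap_if_nil, pv_filter_range_clamp]
  -- names for the clamped bounds
  set x0 : Int := max 0 (x - xyrange) with hx0
  set X1 : Int := min w (x + xyrange + 1) with hX1
  set y0 : Int := max 0 (y - xyrange) with hy0
  set Y1 : Int := min h (y + xyrange + 1) with hY1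
  have hx00 : 0 ≤ x0 := by omega
  have hy00 : 0 ≤ y0 := by omega
  -- B's bounds with the inner max 0 reduce to A's
  rw [show min w (max 0 (x + xyrange + 1)) = max 0 X1 by omega,
      show min h (max 0 (y + xyrange + 1)) = max 0 Y1 by omega]
  by_cases hxe : X1 ≤ x0
  · -- empty column window: both sides are []
    rw [PySem.List.pyRange_one_eq_nil hxe]
    have hsn : ∀ row : List Int,
        PySem.List.slice row (some x0) (some (max 0 X1)) = [] := by
      intro row
      rw [PySem.List.slice_toNat _ hx00 (by omega)]
      simp [List.take_eq_nil_iff]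
      omega
    have : (PySem.List.slice mat (some y0) (some (max 0 Y1))).map
        (fun row => PySem.List.slice row (some x0) (some (max 0 X1))) =
        (PySem.List.slice mat (some y0) (some (max 0 Y1))).map (fun _ => ([] : List Int)) :=
      List.map_congr_left (fun row _ => hsn row)
    rw [this]
    rcases hz : (PySem.List.slice mat (some y0) (some (max 0 Y1))).map (fun _ => ([] : List Int)) with _ | ⟨r, rs⟩
    · rw [pvZipStar]; simp
    · have hlen0 : ∀ r' ∈ (r :: rs), r'.length = 0 := by
        intro r' hr'
        rw [← hz] at hr'
        rcases List.mem_map.mp hr' with ⟨_, _, rfl⟩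
        rfl
      rw [pv_zipStar_eq 0 _ (by simp) hlen0]
      simp
  · have hxlt : x0 < X1 := by omega
    have hX10 : 0 ≤ X1 := by omega
    rw [show max 0 X1 = X1 by omega]
    have hY10 : max 0 Y1 ≤ h := by omega
    -- row lengths in the band
    have hrowlen : ∀ i : ℕ, (y0.toNat + i : Int) < max 0 Y1 →
        X1 ≤ ((mat.getD (y0.toNat + i) []).length : Int) := by
      intro i hi
      have hiY : (y0.toNat + i : Int) < Y1 := by omega
      have hih : y0.toNat + i < mat.length := by omega
      have h2 := hrows hxlt ⟨y0.toNat + i, hih⟩ (by constructor <;> (simp; omega))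
      rw [List.getD_eq_getElem _ _ hih]
      simpa [List.get_eq_getElem] using h2
    -- B side: rows of the band all have length n
    set n : ℕ := (X1 - x0).toNat with hn
    set m : ℕ := ((max 0 Y1) - y0).toNat with hm
    have hband : PySem.List.slice mat (some y0) (some (max 0 Y1)) =
        (mat.drop y0.toNat).take ((max 0 Y1).toNat - y0.toNat) :=
      PySem.List.slice_toNat _ hy00 (by omega)
    have hbandmap : (PySem.List.slice mat (some y0) (some (max 0 Y1))).map
          (fun row => PySem.List.slice row (some x0) (some X1)) =
        (List.range m).map (fun i =>
          PySem.List.slice (mat.getD (y0.toNat + i) []) (some x0) (some X1)) := by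
      rw [hband, show (max 0 Y1).toNat - y0.toNat = m by omega]
      exact pv_take_drop_map [] _ mat y0.toNat m (by omega)
    rw [hbandmap]
    -- each sliced row is a take of a drop of length n
    have hslicerow : ∀ i ∈ List.range m,
        PySem.List.slice (mat.getD (y0.toNat + i) []) (some x0) (some X1) =
          ((mat.getD (y0.toNat + i) []).drop x0.toNat).take n := by
      intro i hi
      rw [PySem.List.slice_toNat _ hx00 hX10, show X1.toNat - x0.toNat = n by omega]
    rw [List.map_congr_left hslicerow]
    by_cases hme : m = 0
    · -- empty row band: B's rows list is [], A's inner y-range is empty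
      rw [hme]
      rw [pvZipStar]
      simp only [List.range_zero, List.map_nil]
      rw [dif_neg (by simp)]
      rw [PySem.List.pyRange_one_eq_nil (by omega)]
      simp
    · have hrne : (List.range m).map (fun i =>
          ((mat.getD (y0.toNat + i) []).drop x0.toNat).take n) ≠ [] := by
        simp [hme]
      have hrlen : ∀ r ∈ (List.range m).map (fun i =>
          ((mat.getD (y0.toNat + i) []).drop x0.toNat).take n), r.length = n := by
        intro r hr
        rcases List.mem_map.mp hr with ⟨i, hi, rfl⟩
        have hi' : (y0.toNat + i : Int) < max 0 Y1 := by
          simp [List.mem_range] at hi; omega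
        have hX1len := hrowlen i hi'
        simp only [List.length_take, List.length_drop]
        omega
      rw [pv_zipStar_eq n _ hrne hrlen]
      -- in this branch the row band is nonempty, so Y1 = max 0 Y1
      have hYeq : max 0 Y1 = Y1 := by omega
      -- normalize both sides to flatMaps over List.range
      rw [PySem.List.pyRange_one x0 X1, show (X1 - x0).toNat = n by omega,
          PySem.List.pyRange_one y0 Y1, show (Y1 - y0).toNat = m by omega]
      simp only [List.flatMap_map, List.map_map, Function.comp_def]
      apply pv_flatMap_congr
      intro j hj
      apply List.map_congr_left
      intro i hi
      have hjn : j < n := List.mem_range.mp hj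
      have him : i < m := List.mem_range.mp hi
      have hyi : y0 + (i : Int) = ((y0.toNat + i : ℕ) : Int) := by push_cast; omega
      have hxj : x0 + (j : Int) = ((x0.toNat + j : ℕ) : Int) := by push_cast; omega
      rw [hyi, PySem.List.pyGetD_natCast, hxj, PySem.List.pyGetD_natCast]
      have hlenr : X1 ≤ (((mat.getD (y0.toNat + i) []).length : ℤ)) := hrowlen i (by omega)
      have hidx : x0.toNat + j < (mat.getD (y0.toNat + i) []).length := by omega
      have hlen2 : j < (((mat.getD (y0.toNat + i) []).drop x0.toNat).take n).length := by
        simp only [List.length_take, List.length_drop]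
        omega
      rw [List.getD_eq_getElem _ 0 hidx, List.getD_eq_getElem _ 0 hlen2,
          List.getElem_take, List.getElem_drop]

-- ===== VERDICT (by name: the statement is the Claim_ definition above) =====
theorem get_vicin_vals_spec : Claim_equal_get_vicin_vals := by
  intro mat x y xyrange _ hpre
  unfold Spec_get_vicin_vals
  exact get_vicin_vals_eq_alt mat x y xyrange hpre
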